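-- pv_equiv track=rewrite | github.com/agatalenz/ALK | 10.py | getMaxNode
-- ===== SOURCE A (Python) =====
-- def getMaxNode(nodes):
--
--     ranks = []
--
--     for x in nodes:
--         if x not in ranks and x > 0:
--             ranks.append(x)
--
--     x = 0
--
--     for i in range(len(nodes)):
--         if nodes[i] == min(ranks):
--             x = i+1
--
--     return x
-- ===== SOURCE B (Python) =====
-- def getMaxNode(nodes):
--     best = None
--     x = 0
--     for i, v in enumerate(nodes):
--         if v > 0 and (best is None or v <= best):
--             best = v
--             x = i + 1
--     return x
-- ===== Notes on version B (the rewrite author's own statement) =====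
-- stated objective: faster
-- what changed: Replaces A's distinct-positives list (quadratic membership scans) and its second index loop that recomputes min(ranks) on every iteration by one enumerate pass keeping the smallest positive seen so far and the 1-based index of its last occurrence.
import Mathlib
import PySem

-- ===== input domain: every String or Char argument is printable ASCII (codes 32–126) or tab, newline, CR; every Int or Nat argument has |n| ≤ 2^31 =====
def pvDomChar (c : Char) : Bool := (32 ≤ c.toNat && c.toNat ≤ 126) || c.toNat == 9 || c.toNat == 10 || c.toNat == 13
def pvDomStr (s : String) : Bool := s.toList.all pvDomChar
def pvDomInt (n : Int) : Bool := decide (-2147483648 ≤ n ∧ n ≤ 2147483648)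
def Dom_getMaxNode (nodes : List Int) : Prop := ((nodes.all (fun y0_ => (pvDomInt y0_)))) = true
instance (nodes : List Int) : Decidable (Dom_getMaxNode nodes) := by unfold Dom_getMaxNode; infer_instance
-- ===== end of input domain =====

-- B replaces A's distinct-positives list (quadratic membership scans) and second index loop that
-- recomputes min(ranks) each iteration by one enumerate pass tracking the smallest positive seen
-- and the 1-based index of its last occurrence (objective: faster).

-- ===== PORT A =====
-- min([]) raises ValueError in Python; PySem.List.min? returns none there. Exactly those inputs
-- (nonempty nodes with no positive element, so ranks = []) are excluded by Pre_getMaxNode; the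
-- `.getD 0` on that none is never reached under Pre_.
def getMaxNode (nodes : List Int) : Int :=
  let ranks := nodes.foldl (fun ranks x => if x ∉ ranks ∧ 0 < x then ranks ++ [x] else ranks) ([] : List Int)
  (PySem.List.pyRange 0 (nodes.length : Int) 1).foldl
    (fun x i =>
      if PySem.List.pyGetD nodes i 0 = (PySem.List.min? ranks (fun y => y)).getD 0 then i + 1 else x) 0

-- ===== PORT B =====
-- body of B's loop: `if v > 0 and (best is None or v <= best): best, x = v, i + 1`
def altStep (st : Option Int × Int) (iv : Int × Int) : Option Int × Int :=
  if 0 < iv.2 then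
    match st.1 with
    | none => (some iv.2, iv.1 + 1)
    | some b => if iv.2 ≤ b then (some iv.2, iv.1 + 1) else st
  else st

def getMaxNode_alt (nodes : List Int) : Int :=
  ((PySem.List.enumerate nodes 0).foldl altStep (none, 0)).2

-- ===== PRECONDITION & SPEC =====
-- Pre_ excludes exactly the inputs where A raises: nonempty nodes with no positive element
-- (there min([]) raises ValueError).
def Pre_getMaxNode (nodes : List Int) : Prop := nodes = [] ∨ ∃ v ∈ nodes, 0 < v
instance (nodes : List Int) : Decidable (Pre_getMaxNode nodes) := by unfold Pre_getMaxNode; infer_instance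
def pvWitness_getMaxNode : List Int := [2, -1, 2]

def Spec_getMaxNode (nodes : List Int) (out : Int) : Prop := out = getMaxNode_alt nodes
instance (nodes : List Int) (out : Int) : Decidable (Spec_getMaxNode nodes out) := by unfold Spec_getMaxNode; infer_instance

-- ===== CLAIM (what is proved, stated in full; the proofs are below) =====
def Claim_equal_getMaxNode : Prop := ∀ (nodes : List Int), Dom_getMaxNode nodes → Pre_getMaxNode nodes → Spec_getMaxNode nodes (getMaxNode nodes)

-- ===== LEMMAS AND PROOFS =====

-- A's first loop, as a named function for the proofs
def ranksOf (nodes : List Int) : List Int :=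
  nodes.foldl (fun ranks x => if x ∉ ranks ∧ 0 < x then ranks ++ [x] else ranks) []

-- 1-based index of the last occurrence of m (0 if absent), as B's loop computes it for a fixed best
def lastIdx (m : Int) (nodes : List Int) : Int :=
  (PySem.List.enumerate nodes 0).foldl (fun x iv => if iv.2 = m then iv.1 + 1 else x) 0

lemma mem_ranks_foldl (nodes : List Int) (acc : List Int) (v : Int) :
    v ∈ nodes.foldl (fun ranks x => if x ∉ ranks ∧ 0 < x then ranks ++ [x] else ranks) acc ↔
      v ∈ acc ∨ (v ∈ nodes ∧ 0 < v) := by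
  induction nodes generalizing acc with
  | nil => simp
  | cons h t ih =>
    simp only [List.foldl_cons]
    rw [ih]
    split_ifs with hc
    · simp only [List.mem_append, List.mem_cons, List.not_mem_nil, or_false]
      constructor
      · rintro ((hv | rfl) | hv)
        · exact Or.inl hv
        · exact Or.inr ⟨Or.inl rfl, hc.2⟩
        · exact Or.inr ⟨Or.inr hv.1, hv.2⟩
      · rintro (hv | ⟨(rfl | hv), hp⟩)
        · exact Or.inl (Or.inl hv)
        · exact Or.inl (Or.inr rfl)
        · exact Or.inr ⟨hv, hp⟩
    · rw [not_and_or, not_not] at hc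
      simp only [List.mem_cons]
      constructor
      · rintro (hv | hv)
        · exact Or.inl hv
        · exact Or.inr ⟨Or.inr hv.1, hv.2⟩
      · rintro (hv | ⟨(rfl | hv), hp⟩)
        · exact Or.inl hv
        · rcases hc with hm | hnp
          · exact Or.inl hm
          · omega
        · exact Or.inr ⟨hv, hp⟩

lemma mem_ranksOf (nodes : List Int) (v : Int) :
    v ∈ ranksOf nodes ↔ v ∈ nodes ∧ 0 < v := by
  unfold ranksOf; rw [mem_ranks_foldl]; simp

lemma min?_append_singleton (l : List Int) (v : Int) :
    PySem.List.min? (l ++ [v]) (fun y => y) =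
      some (min ((PySem.List.min? l (fun y => y)).getD v) v) := by
  cases l with
  | nil =>
    rw [List.nil_append, PySem.List.min?_id_cons]
    simp [PySem.List.min?]
  | cons x t =>
    rw [List.cons_append, PySem.List.min?_id_cons, PySem.List.min?_id_cons]
    simp [List.foldl_append]

lemma ranksOf_append (nodes : List Int) (v : Int) :
    ranksOf (nodes ++ [v]) =
      if v ∉ ranksOf nodes ∧ 0 < v then ranksOf nodes ++ [v] else ranksOf nodes := by
  unfold ranksOf; rw [List.foldl_append]; rfl

lemma lastIdx_append (m : Int) (nodes : List Int) (v : Int) :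
    lastIdx m (nodes ++ [v]) = if v = m then (nodes.length : Int) + 1 else lastIdx m nodes := by
  unfold lastIdx
  rw [PySem.List.enumerate_append, List.foldl_append]
  simp [PySem.List.enumerate_cons, PySem.List.enumerate_nil]

lemma alt_invariant (nodes : List Int) :
    (PySem.List.enumerate nodes 0).foldl altStep (none, 0) =
      (PySem.List.min? (ranksOf nodes) (fun y => y),
       match PySem.List.min? (ranksOf nodes) (fun y => y) with
       | none => 0
       | some m => lastIdx m nodes) := by
  induction nodes using List.reverseRecOn with
  | nil => rfl
  | append_singleton ys v ih =>
    rw [PySem.List.enumerate_append, List.foldl_append, ih,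
        PySem.List.enumerate_cons, PySem.List.enumerate_nil]
    rw [ranksOf_append]
    rcases hmin : PySem.List.min? (ranksOf ys) (fun y => y) with _ | m
    · -- no positive seen yet: ranksOf ys = []
      have hnil : ranksOf ys = [] := (PySem.List.min?_eq_none_iff _ _).mp hmin
      simp only [List.foldl_cons, List.foldl_nil, altStep, hnil]
      by_cases hv : 0 < v
      · simp [hv, PySem.List.min?_id_cons, lastIdx_append]
      · simp [hv, PySem.List.min?]
    · -- current best is m, the minimum of ranksOf ys
      have hmpos : 0 < m := ((mem_ranksOf ys m).mp (PySem.List.min?_mem hmin)).2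
      simp only [List.foldl_cons, List.foldl_nil, altStep]
      by_cases hv : 0 < v
      · by_cases hle : v ≤ m
        · -- new best v; the new minimum is v
          by_cases hmem : v ∈ ranksOf ys
          · -- v was already in ranks, so m ≤ v, hence v = m
            have hge : m ≤ v := PySem.List.min?_isMin hmin v hmem
            have hvm : v = m := le_antisymm hle hge
            subst hvm
            simp [hmem, hmin, hv, lastIdx_append]
          · simp only [hmem, hv, not_false_eq_true, and_self, if_pos]
            rw [min?_append_singleton, hmin]
            simp [hle, lastIdx_append]
        · -- v > m: best unchanged, min unchanged, v ≠ m
          have hne : v ≠ m := by omega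
          by_cases hmem : v ∈ ranksOf ys
          · simp [hv, hle, hmem, hmin, hne, lastIdx_append]
          · simp only [hmem, hv, not_false_eq_true, and_self, if_pos]
            rw [min?_append_singleton, hmin]
            simp [hle, hne, min_eq_left (by omega : m ≤ v), lastIdx_append]
      · -- v ≤ 0: nothing changes, and v ≠ m since 0 < m
        have hne : v ≠ m := by omega
        simp [hv, hmin, hne, lastIdx_append]

lemma getMaxNode_eq_lastIdx (nodes : List Int) (m : Int)
    (h : PySem.List.min? (ranksOf nodes) (fun y => y) = some m) :
    getMaxNode nodes = lastIdx m nodes := by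
  show (PySem.List.pyRange 0 (nodes.length : Int) 1).foldl
      (fun x i =>
        if PySem.List.pyGetD nodes i 0 = (PySem.List.min? (ranksOf nodes) (fun y => y)).getD 0
        then i + 1 else x) 0 = lastIdx m nodes
  rw [h]
  unfold lastIdx
  rw [PySem.List.enumerate_eq_map_pyRange nodes 0, List.foldl_map]
  rfl

-- ===== VERDICT (by name: the statement is the Claim_ definition above) =====
theorem getMaxNode_spec : Claim_equal_getMaxNode := by
  intro nodes _ hpre
  unfold Spec_getMaxNode
  rcases hpre with rfl | ⟨v, hv, hvpos⟩
  · rfl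
  · have hmem : v ∈ ranksOf nodes := (mem_ranksOf nodes v).mpr ⟨hv, hvpos⟩
    have hne : ranksOf nodes ≠ [] := by intro h; rw [h] at hmem; exact (List.not_mem_nil) hmem
    rcases hmin : PySem.List.min? (ranksOf nodes) (fun y => y) with _ | m
    · exact absurd ((PySem.List.min?_eq_none_iff _ _).mp hmin) hne
    · rw [getMaxNode_eq_lastIdx nodes m hmin]
      unfold getMaxNode_alt
      rw [alt_invariant, hmin]
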